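-- pv_equiv track=rewrite | github.com/AIC-Turku/AIC-Turku-database | scripts/build_context.py | _derive_capabilities_from_legacy_modalities
-- ===== SOURCE A (Python) =====
-- def _derive_capabilities_from_legacy_modalities(modalities: list[str]) -> dict[str, list[str]]:
--     imaging = {'confocal_point','confocal_spinning_disk','widefield_fluorescence','tirf','multiphoton','light_sheet','sim','sted','resolft','smlm','ism'}
--     contrast = {'transmitted_brightfield','reflected_brightfield','phase_contrast','dic','darkfield','polarized_light','optical_sectioning'}
--     readouts = {'spectral_imaging','flim','fcs','fret'}
--     workflows = {'live_cell_imaging'}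
--     assay = {'frap','photoactivation'}
--     non_opt = {'afm','impedance_cytometry'}
--     out={'imaging_modes':[], 'contrast_methods':[], 'readouts':[], 'workflows':[], 'assay_operations':[], 'non_optical':[]}
--     for m in modalities:
--         if m in imaging: out['imaging_modes'].append(m)
--         elif m in contrast: out['contrast_methods'].append(m)
--         elif m in readouts: out['readouts'].append(m)
--         elif m in workflows: out['workflows'].append(m)
--         elif m in assay: out['assay_operations'].append(m)
--         elif m in non_opt: out['non_optical'].append(m)
--     return out
-- ===== SOURCE B (Python) =====
-- _CATEGORIES = [
--     ('imaging_modes', {'confocal_point', 'confocal_spinning_disk', 'widefield_fluorescence',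
--                        'tirf', 'multiphoton', 'light_sheet', 'sim', 'sted', 'resolft', 'smlm', 'ism'}),
--     ('contrast_methods', {'transmitted_brightfield', 'reflected_brightfield', 'phase_contrast',
--                           'dic', 'darkfield', 'polarized_light', 'optical_sectioning'}),
--     ('readouts', {'spectral_imaging', 'flim', 'fcs', 'fret'}),
--     ('workflows', {'live_cell_imaging'}),
--     ('assay_operations', {'frap', 'photoactivation'}),
--     ('non_optical', {'afm', 'impedance_cytometry'}),
-- ]
--
--
-- def _derive_capabilities_from_legacy_modalities(modalities: list[str]) -> dict[str, list[str]]: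
--     # One filtering pass per category (categories are pairwise disjoint, so the
--     # elif order of the original cascade never mattered).
--     return {cat: [m for m in modalities if m in members] for cat, members in _CATEGORIES}
-- ===== Notes on version B (the rewrite author's own statement) =====
-- stated objective: simpler
-- what changed: Inverted the loop structure: instead of one pass over the elements with a six-way if/elif dispatch per element, B loops over the six categories and builds each bucket as a filter of the input list (a one-line dict comprehension); correct because the category sets are pairwise disjoint.
import Mathlib
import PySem

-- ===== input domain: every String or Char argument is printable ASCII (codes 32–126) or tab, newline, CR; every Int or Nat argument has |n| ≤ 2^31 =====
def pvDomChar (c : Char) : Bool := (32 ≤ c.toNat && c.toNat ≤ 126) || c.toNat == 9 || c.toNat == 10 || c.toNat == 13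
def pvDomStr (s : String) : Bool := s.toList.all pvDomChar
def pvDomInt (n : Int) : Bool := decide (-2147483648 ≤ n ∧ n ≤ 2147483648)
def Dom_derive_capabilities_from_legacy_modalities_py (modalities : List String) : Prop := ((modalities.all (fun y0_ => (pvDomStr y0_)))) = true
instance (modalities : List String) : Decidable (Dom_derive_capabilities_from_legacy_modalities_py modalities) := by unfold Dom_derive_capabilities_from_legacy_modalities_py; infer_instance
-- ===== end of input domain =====

-- B inverts the loop: instead of one pass over the elements with a six-way if/elif
-- dispatch, it loops over the six categories and builds each bucket by filtering the
-- input list (objective: simpler; correct because the category sets are disjoint).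

-- ===== PORT A =====
-- A's six membership sets (Python sets of distinct literals; membership-only use)
def pvImaging : List String := ["confocal_point", "confocal_spinning_disk", "widefield_fluorescence", "tirf", "multiphoton", "light_sheet", "sim", "sted", "resolft", "smlm", "ism"]
def pvContrast : List String := ["transmitted_brightfield", "reflected_brightfield", "phase_contrast", "dic", "darkfield", "polarized_light", "optical_sectioning"]
def pvReadouts : List String := ["spectral_imaging", "flim", "fcs", "fret"]
def pvWorkflows : List String := ["live_cell_imaging"]
def pvAssay : List String := ["frap", "photoactivation"]
def pvNonOpt : List String := ["afm", "impedance_cytometry"]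

-- the out dict A initialises, in A's key order
def pvOut0 : PySem.Dict String (List String) :=
  PySem.Dict.ofList [("imaging_modes", []), ("contrast_methods", []), ("readouts", []), ("workflows", []), ("assay_operations", []), ("non_optical", [])]

-- A's loop body: the if/elif cascade, out[key].append(m) ported as Dict.modify
def pvStepA (d : PySem.Dict String (List String)) (m : String) : PySem.Dict String (List String) :=
  if m ∈ pvImaging then d.modify "imaging_modes" [] (· ++ [m])
  else if m ∈ pvContrast then d.modify "contrast_methods" [] (· ++ [m])
  else if m ∈ pvReadouts then d.modify "readouts" [] (· ++ [m])
  else if m ∈ pvWorkflows then d.modify "workflows" [] (· ++ [m])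
  else if m ∈ pvAssay then d.modify "assay_operations" [] (· ++ [m])
  else if m ∈ pvNonOpt then d.modify "non_optical" [] (· ++ [m])
  else d

def derive_capabilities_from_legacy_modalities_py (modalities : List String) : List (String × List String) :=
  (modalities.foldl pvStepA pvOut0).items

-- ===== PORT B =====
-- Source B's _CATEGORIES table
def pvCategories : List (String × List String) :=
  [("imaging_modes", pvImaging),
   ("contrast_methods", pvContrast),
   ("readouts", pvReadouts),
   ("workflows", pvWorkflows),
   ("assay_operations", pvAssay),
   ("non_optical", pvNonOpt)]

-- Source B's dict comprehension {cat: [m for m in modalities if m in members] …}: the six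
-- category keys are distinct literals, so insertion order = table order and the dict
-- IS this association list (exact).
def derive_capabilities_from_legacy_modalities_py_alt (modalities : List String) : List (String × List String) :=
  pvCategories.map (fun p => (p.1, modalities.filter (fun m => decide (m ∈ p.2))))

-- ===== PRECONDITION & SPEC =====
def Spec_derive_capabilities_from_legacy_modalities_py (modalities : List String) (out : List (String × List String)) : Prop := out = derive_capabilities_from_legacy_modalities_py_alt modalities
instance (modalities : List String) (out : List (String × List String)) : Decidable (Spec_derive_capabilities_from_legacy_modalities_py modalities out) := by unfold Spec_derive_capabilities_from_legacy_modalities_py; infer_instance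

-- ===== CLAIM (what is proved, stated in full; the proofs are below) =====
def Claim_equal_derive_capabilities_from_legacy_modalities_py : Prop := ∀ (modalities : List String), Dom_derive_capabilities_from_legacy_modalities_py modalities → Spec_derive_capabilities_from_legacy_modalities_py modalities (derive_capabilities_from_legacy_modalities_py modalities)

-- ===== LEMMAS AND PROOFS =====
-- A's loop state as six explicit accumulators (proof-side view of the dict)
def pvDict6 (a b c d e f : List String) : PySem.Dict String (List String) :=
  PySem.Dict.mk [("imaging_modes", a), ("contrast_methods", b), ("readouts", c), ("workflows", d), ("assay_operations", e), ("non_optical", f)]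

def pvAllNames : List String :=
  pvImaging ++ pvContrast ++ pvReadouts ++ pvWorkflows ++ pvAssay ++ pvNonOpt

-- one step of A updates exactly the bucket that B's per-category filter would keep m in
theorem pvStepA_dict6 (a b c d e f : List String) (m : String) :
    pvStepA (pvDict6 a b c d e f) m =
      pvDict6 (a ++ if m ∈ pvImaging then [m] else [])
              (b ++ if m ∈ pvContrast then [m] else [])
              (c ++ if m ∈ pvReadouts then [m] else [])
              (d ++ if m ∈ pvWorkflows then [m] else [])
              (e ++ if m ∈ pvAssay then [m] else [])
              (f ++ if m ∈ pvNonOpt then [m] else []) := by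
  by_cases h : m ∈ pvAllNames
  · fin_cases h <;>
      simp [pvStepA, pvDict6, PySem.Dict.modify, PySem.Dict.insert, PySem.Dict.getD, PySem.Dict.get?, PySem.Dict.contains, pvImaging, pvContrast, pvReadouts, pvWorkflows, pvAssay, pvNonOpt]
  · simp only [pvAllNames, List.mem_append, not_or] at h
    obtain ⟨⟨⟨⟨⟨h1, h2⟩, h3⟩, h4⟩, h5⟩, h6⟩ := h
    simp [pvStepA, h1, h2, h3, h4, h5, h6]

-- the fold invariant: A's whole loop appends exactly the per-category filters
theorem pvFoldA (ms : List String) : ∀ (a b c d e f : List String),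
    ms.foldl pvStepA (pvDict6 a b c d e f) =
      pvDict6 (a ++ ms.filter (fun m => decide (m ∈ pvImaging)))
              (b ++ ms.filter (fun m => decide (m ∈ pvContrast)))
              (c ++ ms.filter (fun m => decide (m ∈ pvReadouts)))
              (d ++ ms.filter (fun m => decide (m ∈ pvWorkflows)))
              (e ++ ms.filter (fun m => decide (m ∈ pvAssay)))
              (f ++ ms.filter (fun m => decide (m ∈ pvNonOpt))) := by
  induction ms with
  | nil => intro a b c d e f; simp
  | cons m ms ih =>
    intro a b c d e f
    simp only [List.foldl_cons, pvStepA_dict6, ih, List.filter_cons]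
    by_cases h1 : m ∈ pvImaging <;> by_cases h2 : m ∈ pvContrast <;>
      by_cases h3 : m ∈ pvReadouts <;> by_cases h4 : m ∈ pvWorkflows <;>
      by_cases h5 : m ∈ pvAssay <;> by_cases h6 : m ∈ pvNonOpt <;>
      simp [h1, h2, h3, h4, h5, h6]

-- ===== VERDICT (by name: the statement is the Claim_ definition above) =====
theorem derive_capabilities_from_legacy_modalities_py_spec : Claim_equal_derive_capabilities_from_legacy_modalities_py := by
  intro modalities _
  unfold Spec_derive_capabilities_from_legacy_modalities_py derive_capabilities_from_legacy_modalities_py derive_capabilities_from_legacy_modalities_py_alt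
  rw [show pvOut0 = pvDict6 [] [] [] [] [] [] from rfl, pvFoldA]
  simp [pvDict6, pvCategories]
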